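-- pv_equiv track=rewrite | github.com/javs9805/artificial-intelligence | Tarea 1/IA_N_Puzzle_2.py | CREAR_MATRIZ_TEMPORAL
-- ===== SOURCE A (Python) =====
-- def CREAR_MATRIZ_TEMPORAL(ACCIONES, MATRIZ_DESORDENADA):
--     # Crear una copia de la matriz desordenada
--     MATRIZ_RESULTANTE = [list(row) for row in MATRIZ_DESORDENADA]
--
--     for accion in ACCIONES:
--         # Buscar la posición del espacio en blanco (valor 0) en la matriz resultante
--         for i in range(len(MATRIZ_RESULTANTE)):
--             for j in range(len(MATRIZ_RESULTANTE[i])):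
--                 if MATRIZ_RESULTANTE[i][j] == 0:
--                     x, y = i, j
--                     break
--
--         # Realizar la acción especificada
--         if accion == "DERECHA" and y < len(MATRIZ_RESULTANTE[0]) - 1:
--             MATRIZ_RESULTANTE[x][y], MATRIZ_RESULTANTE[x][y + 1] = MATRIZ_RESULTANTE[x][y + 1], MATRIZ_RESULTANTE[x][y]
--         elif accion == "IZQUIERDA" and y > 0:
--             MATRIZ_RESULTANTE[x][y], MATRIZ_RESULTANTE[x][y - 1] = MATRIZ_RESULTANTE[x][y - 1], MATRIZ_RESULTANTE[x][y]
--         elif accion == "ARRIBA" and x > 0: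
--             MATRIZ_RESULTANTE[x][y], MATRIZ_RESULTANTE[x - 1][y] = MATRIZ_RESULTANTE[x - 1][y], MATRIZ_RESULTANTE[x][y]
--         elif accion == "ABAJO" and x < len(MATRIZ_RESULTANTE) - 1:
--             MATRIZ_RESULTANTE[x][y], MATRIZ_RESULTANTE[x + 1][y] = MATRIZ_RESULTANTE[x + 1][y], MATRIZ_RESULTANTE[x][y]
--
--     return MATRIZ_RESULTANTE
-- ===== SOURCE B (Python) =====
-- def CREAR_MATRIZ_TEMPORAL(ACCIONES, MATRIZ_DESORDENADA):
--     grid = [list(row) for row in MATRIZ_DESORDENADA]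
--     pos = next(((i, j) for i, row in enumerate(grid)
--                 for j, v in enumerate(row) if v == 0), None)
--     if pos is None:
--         return grid
--     x, y = pos
--     rows = len(grid)
--     cols = len(grid[0])
--     DELTA = {"DERECHA": (0, 1), "IZQUIERDA": (0, -1),
--              "ARRIBA": (-1, 0), "ABAJO": (1, 0)}
--     for accion in ACCIONES:
--         d = DELTA.get(accion)
--         if d is None:
--             continue
--         nx, ny = x + d[0], y + d[1]
--         if 0 <= nx < rows and 0 <= ny < cols:
--             grid[x][y], grid[nx][ny] = grid[nx][ny], grid[x][y]
--             x, y = nx, ny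
--     return grid
-- ===== Notes on version B (the rewrite author's own statement) =====
-- stated objective: faster
-- what changed: B locates the blank (0) once and tracks its position incrementally with an O(1) update per move, instead of rescanning the whole matrix before every move as A does.
-- outside the precondition, e.g. on CREAR_MATRIZ_TEMPORAL(['IZQUIERDA'], [[1], [2, 3, 0]]): A returns [[1], [2, 0, 3]], B returns [[1], [2, 3, 0]]
import Mathlib
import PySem

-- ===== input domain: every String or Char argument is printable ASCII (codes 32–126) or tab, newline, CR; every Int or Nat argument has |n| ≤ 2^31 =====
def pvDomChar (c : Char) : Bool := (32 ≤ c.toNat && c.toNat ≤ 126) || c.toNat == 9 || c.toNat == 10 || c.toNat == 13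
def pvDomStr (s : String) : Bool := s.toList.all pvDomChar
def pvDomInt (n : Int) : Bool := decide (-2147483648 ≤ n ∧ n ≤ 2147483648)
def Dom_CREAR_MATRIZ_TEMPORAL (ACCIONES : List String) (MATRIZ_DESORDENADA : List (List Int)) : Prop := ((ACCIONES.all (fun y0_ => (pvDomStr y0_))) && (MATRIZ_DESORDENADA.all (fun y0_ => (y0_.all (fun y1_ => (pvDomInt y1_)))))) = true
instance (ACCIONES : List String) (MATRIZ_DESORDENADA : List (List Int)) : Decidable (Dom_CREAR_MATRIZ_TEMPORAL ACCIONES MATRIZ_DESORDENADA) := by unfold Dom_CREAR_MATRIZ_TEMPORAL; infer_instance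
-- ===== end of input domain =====

-- B finds the blank (0) once and tracks it incrementally (O(1) per move) instead of rescanning
-- the whole matrix before every move as A does; return-value equivalence on Pre_ is proved.

-- ===== PORT A =====
-- shared 2-D primitives (both Pythons read/write cells and do the same tuple swap)
def pvGet2 (g : List (List Int)) (i j : Nat) : Int := (g.getD i []).getD j 0
def pvSet2 (g : List (List Int)) (i j : Nat) (v : Int) : List (List Int) :=
  g.set i ((g.getD i []).set j v)
-- Python "g[x][y], g[p][q] = g[p][q], g[x][y]": both reads first, then assignment left-to-right
def pvSwap (g : List (List Int)) (x y p q : Nat) : List (List Int) :=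
  pvSet2 (pvSet2 g x y (pvGet2 g p q)) p q (pvGet2 g x y)
-- inner "for j … if row[j]==0: …; break" / B's per-row generator: first index of 0 in the row
def pvRowZero : List Int → Nat → Option Nat
  | [], _ => none
  | v :: vs, j => if v = 0 then some j else pvRowZero vs (j + 1)

-- A's full rescan: the outer i-loop is NOT broken, so the LAST row containing a 0 wins;
-- acc is the (x, y) left over from the previous iteration (kept when no 0 is found)
def pvScanA : List (List Int) → Nat → Option (Nat × Nat) → Option (Nat × Nat)
  | [], _, acc => acc
  | r :: rs, i, acc =>
      pvScanA rs (i + 1)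
        (match pvRowZero r 0 with
         | some j => some (i, j)
         | none => acc)

-- one iteration of A's action loop (Nat coordinates; "y < len(g[0]) - 1" ↔ "y + 1 < len(g[0])"
-- and "x < len(g) - 1" ↔ "x + 1 < len(g)" over the integers, exact for every Nat value).
-- When no 0 exists Python's x, y are unbound (NameError on a move): that case is outside Pre_.
def pvStepA (st : List (List Int) × Option (Nat × Nat)) (accion : String) :
    List (List Int) × Option (Nat × Nat) :=
  let g := st.1
  match pvScanA g 0 st.2 with
  | none => (g, none)
  | some (x, y) =>
    let g' :=
      if accion = "DERECHA" ∧ y + 1 < (g.headD []).length then pvSwap g x y x (y + 1)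
      else if accion = "IZQUIERDA" ∧ 0 < y then pvSwap g x y x (y - 1)
      else if accion = "ARRIBA" ∧ 0 < x then pvSwap g x y (x - 1) y
      else if accion = "ABAJO" ∧ x + 1 < g.length then pvSwap g x y (x + 1) y
      else g
    (g', some (x, y))

def CREAR_MATRIZ_TEMPORAL (ACCIONES : List String) (MATRIZ_DESORDENADA : List (List Int)) : List (List Int) :=
  let R := MATRIZ_DESORDENADA.map (fun row => row)
  (ACCIONES.foldl pvStepA (R, none)).1

-- ===== PORT B =====
-- Source B's next(((i,j) …), None): first 0 in row-major order
def pvFindZeroB : List (List Int) → Nat → Option (Nat × Nat)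
  | [], _ => none
  | r :: rs, i =>
    match pvRowZero r 0 with
    | some j => some (i, j)
    | none => pvFindZeroB rs (i + 1)

-- Source B's DELTA dict lookup
def pvDeltaB (a : String) : Option (Int × Int) :=
  if a = "DERECHA" then some (0, 1)
  else if a = "IZQUIERDA" then some (0, -1)
  else if a = "ARRIBA" then some (-1, 0)
  else if a = "ABAJO" then some (1, 0)
  else none

-- one iteration of Source B's loop: O(1) update of the tracked blank position (Int coordinates)
def pvStepB (rows cols : Nat) (st : List (List Int) × Int × Int) (accion : String) :
    List (List Int) × Int × Int :=
  match pvDeltaB accion with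
  | none => st
  | some (dx, dy) =>
    let nx := st.2.1 + dx
    let ny := st.2.2 + dy
    if 0 ≤ nx ∧ nx < (rows : Int) ∧ 0 ≤ ny ∧ ny < (cols : Int) then
      (pvSwap st.1 st.2.1.toNat st.2.2.toNat nx.toNat ny.toNat, nx, ny)
    else st

def CREAR_MATRIZ_TEMPORAL_alt (ACCIONES : List String) (MATRIZ_DESORDENADA : List (List Int)) : List (List Int) :=
  let grid := MATRIZ_DESORDENADA.map (fun row => row)
  match pvFindZeroB grid 0 with
  | none => grid
  | some (x, y) =>
    let rows := grid.length
    let cols := (grid.headD []).length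
    (ACCIONES.foldl (pvStepB rows cols) (grid, (x : Int), (y : Int))).1

-- ===== PRECONDITION & SPEC =====
-- Pre_ excludes (when moves are given) matrices that are ragged or do not hold exactly one
-- blank 0: there A's last-row rescan, its row-0 width bound and its unbound scan state give
-- accidental values or a NameError, while B tracks a single blank.
def Pre_CREAR_MATRIZ_TEMPORAL (ACCIONES : List String) (MATRIZ_DESORDENADA : List (List Int)) : Prop :=
  (∀ a ∈ ACCIONES, ¬a = "DERECHA" ∧ ¬a = "IZQUIERDA" ∧ ¬a = "ARRIBA" ∧ ¬a = "ABAJO") ∨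
  ((∀ r ∈ MATRIZ_DESORDENADA, r.length = (MATRIZ_DESORDENADA.headD []).length) ∧
   ∃ x < MATRIZ_DESORDENADA.length, ∃ y < (MATRIZ_DESORDENADA.headD []).length,
     (MATRIZ_DESORDENADA.getD x []).getD y 0 = 0 ∧
     ∀ i < MATRIZ_DESORDENADA.length, ∀ j < (MATRIZ_DESORDENADA.headD []).length,
       (MATRIZ_DESORDENADA.getD i []).getD j 0 = 0 → i = x ∧ j = y)

instance (ACCIONES : List String) (MATRIZ_DESORDENADA : List (List Int)) : Decidable (Pre_CREAR_MATRIZ_TEMPORAL ACCIONES MATRIZ_DESORDENADA) := by unfold Pre_CREAR_MATRIZ_TEMPORAL; infer_instance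

def pvWitness_CREAR_MATRIZ_TEMPORAL : List String × List (List Int) :=
  (["DERECHA", "ABAJO"], [[0, 1], [2, 3]])

def Spec_CREAR_MATRIZ_TEMPORAL (ACCIONES : List String) (MATRIZ_DESORDENADA : List (List Int)) (out : List (List Int)) : Prop := out = CREAR_MATRIZ_TEMPORAL_alt ACCIONES MATRIZ_DESORDENADA
instance (ACCIONES : List String) (MATRIZ_DESORDENADA : List (List Int)) (out : List (List Int)) : Decidable (Spec_CREAR_MATRIZ_TEMPORAL ACCIONES MATRIZ_DESORDENADA out) := by unfold Spec_CREAR_MATRIZ_TEMPORAL; infer_instance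

-- ===== CLAIM (what is proved, stated in full; the proofs are below) =====
def Claim_equal_CREAR_MATRIZ_TEMPORAL : Prop := ∀ (ACCIONES : List String) (MATRIZ_DESORDENADA : List (List Int)), Dom_CREAR_MATRIZ_TEMPORAL ACCIONES MATRIZ_DESORDENADA → Pre_CREAR_MATRIZ_TEMPORAL ACCIONES MATRIZ_DESORDENADA → Spec_CREAR_MATRIZ_TEMPORAL ACCIONES MATRIZ_DESORDENADA (CREAR_MATRIZ_TEMPORAL ACCIONES MATRIZ_DESORDENADA)

-- ===== LEMMAS AND PROOFS =====

-- the loop invariant: g is a rows×cols grid whose unique 0 sits at (x, y)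
def pvInv (rows cols : Nat) (g : List (List Int)) (x y : Nat) : Prop :=
  g.length = rows ∧ (∀ i < rows, (g.getD i []).length = cols) ∧ x < rows ∧ y < cols ∧
  pvGet2 g x y = 0 ∧
  ∀ i j, i < rows → j < cols → pvGet2 g i j = 0 → i = x ∧ j = y

theorem pvRowZero_none : ∀ (r : List Int) (k : Nat),
    (∀ j < r.length, r.getD j 0 ≠ 0) → pvRowZero r k = none := by
  intro r
  induction r with
  | nil => intro k _; rfl
  | cons v vs ih =>
    intro k h
    have hv : v ≠ 0 := h 0 (by simp)
    simp only [pvRowZero, if_neg hv]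
    exact ih (k + 1) (fun j hj => h (j + 1) (by simpa using Nat.succ_lt_succ hj))

theorem pvRowZero_some : ∀ (r : List Int) (k y : Nat),
    y < r.length → r.getD y 0 = 0 → (∀ j < y, r.getD j 0 ≠ 0) →
    pvRowZero r k = some (k + y) := by
  intro r
  induction r with
  | nil => intro k y hy; simp at hy
  | cons v vs ih =>
    intro k y hy h0 hfirst
    by_cases hv : v = 0
    · have : y = 0 := by
        by_contra hne
        exact hfirst 0 (Nat.pos_of_ne_zero hne) (by simpa using hv)
      subst this
      simp [pvRowZero, hv]
    · have hy0 : y ≠ 0 := by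
        intro h; subst h; simp at h0; exact hv h0
      obtain ⟨y', rfl⟩ := Nat.exists_eq_succ_of_ne_zero hy0
      have := ih (k + 1) y' (by simpa using Nat.lt_of_succ_lt_succ hy)
        (by simpa using h0)
        (fun j hj => by simpa using hfirst (j + 1) (Nat.succ_lt_succ hj))
      simp only [pvRowZero, if_neg hv, this]
      congr 1
      omega

theorem pvScanA_keep : ∀ (rs : List (List Int)) (k : Nat) (acc : Option (Nat × Nat)),
    (∀ i < rs.length, ∀ j < (rs.getD i []).length, (rs.getD i []).getD j 0 ≠ 0) →
    pvScanA rs k acc = acc := by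
  intro rs
  induction rs with
  | nil => intro k acc _; rfl
  | cons r rest ih =>
    intro k acc h
    have hr : pvRowZero r 0 = none :=
      pvRowZero_none r 0 (by simpa using h 0 (by simp))
    simp only [pvScanA, hr]
    exact ih (k + 1) acc (fun i hi j hj => by
      simpa using h (i + 1) (by simpa using Nat.succ_lt_succ hi) j (by simpa using hj))

theorem pvScanA_eq : ∀ (rs : List (List Int)) (k : Nat) (acc : Option (Nat × Nat)) (x y : Nat),
    x < rs.length → y < (rs.getD x []).length → (rs.getD x []).getD y 0 = 0 →
    (∀ i j, i < rs.length → j < (rs.getD i []).length → (rs.getD i []).getD j 0 = 0 → i = x ∧ j = y) →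
    pvScanA rs k acc = some (k + x, y) := by
  intro rs
  induction rs with
  | nil => intro k acc x y hx; simp at hx
  | cons r rest ih =>
    intro k acc x y hx hy h0 huniq
    cases x with
    | zero =>
      have hr : pvRowZero r 0 = some y := by
        have := pvRowZero_some r 0 y (by simpa using hy) (by simpa using h0)
          (fun j hj hzero => by
            have := huniq 0 j (by simp) (by simpa using Nat.lt_trans hj (by simpa using hy))
              (by simpa using hzero)
            omega)
        simpa using this
      simp only [pvScanA, hr]
      have : pvScanA rest (k + 1) (some (k, y)) = some (k, y) := by
        apply pvScanA_keep
        intro i hi j hj hzero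
        have := huniq (i + 1) j (by simpa using Nat.succ_lt_succ hi) (by simpa using hj)
          (by simpa using hzero)
        omega
      simpa using this
    | succ x' =>
      have hr : pvRowZero r 0 = none := by
        apply pvRowZero_none
        intro j hj hzero
        have := huniq 0 j (by simp)
          (by simpa using hj) (by simpa using hzero)
        omega
      simp only [pvScanA, hr]
      have := ih (k + 1) acc x' y (by simpa using Nat.lt_of_succ_lt_succ hx)
        (by simpa using hy) (by simpa using h0)
        (fun i j hi hj hzero => by
          have := huniq (i + 1) j (by simpa using Nat.succ_lt_succ hi) (by simpa using hj)
            (by simpa using hzero)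
          omega)
      rw [this]
      congr 2
      omega

theorem pvFindZeroB_eq : ∀ (rs : List (List Int)) (k : Nat) (x y : Nat),
    x < rs.length → y < (rs.getD x []).length → (rs.getD x []).getD y 0 = 0 →
    (∀ i j, i < rs.length → j < (rs.getD i []).length → (rs.getD i []).getD j 0 = 0 → i = x ∧ j = y) →
    pvFindZeroB rs k = some (k + x, y) := by
  intro rs
  induction rs with
  | nil => intro k x y hx; simp at hx
  | cons r rest ih =>
    intro k x y hx hy h0 huniq
    cases x with
    | zero =>
      have hr : pvRowZero r 0 = some y := by
        have := pvRowZero_some r 0 y (by simpa using hy) (by simpa using h0)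
          (fun j hj hzero => by
            have := huniq 0 j (by simp) (by simpa using Nat.lt_trans hj (by simpa using hy))
              (by simpa using hzero)
            omega)
        simpa using this
      simp [pvFindZeroB, hr]
    | succ x' =>
      have hr : pvRowZero r 0 = none := by
        apply pvRowZero_none
        intro j hj hzero
        have := huniq 0 j (by simp) (by simpa using hj) (by simpa using hzero)
        omega
      simp only [pvFindZeroB, hr]
      have := ih (k + 1) x' y (by simpa using Nat.lt_of_succ_lt_succ hx)
        (by simpa using hy) (by simpa using h0)
        (fun i j hi hj hzero => by
          have := huniq (i + 1) j (by simpa using Nat.succ_lt_succ hi) (by simpa using hj)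
            (by simpa using hzero)
          omega)
      rw [this]
      congr 2
      omega

theorem pvSet2_length (g : List (List Int)) (i j : Nat) (v : Int) :
    (pvSet2 g i j v).length = g.length := by
  simp [pvSet2]

theorem pvSet2_getD_row (g : List (List Int)) (i i' j : Nat) (v : Int) :
    (pvSet2 g i j v).getD i' [] =
      if i' = i ∧ i < g.length then (g.getD i []).set j v else g.getD i' [] := by
  simp only [pvSet2, List.getD_eq_getElem?_getD, List.getElem?_set]
  split_ifs <;> simp_all

theorem pvSet2_rowlen (g : List (List Int)) (i i' j : Nat) (v : Int) :
    ((pvSet2 g i j v).getD i' []).length = (g.getD i' []).length := by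
  rw [pvSet2_getD_row]
  split_ifs with h
  · rw [List.length_set, h.1]
  · rfl

theorem pvGet2_set2_self (g : List (List Int)) (i j : Nat) (v : Int)
    (hi : i < g.length) (hj : j < (g.getD i []).length) :
    pvGet2 (pvSet2 g i j v) i j = v := by
  unfold pvGet2
  rw [pvSet2_getD_row, if_pos (show i = i ∧ i < g.length from ⟨rfl, hi⟩)]
  have hj' : j < (g[i]?.getD []).length := by simpa [List.getD_eq_getElem?_getD] using hj
  simp [List.getD_eq_getElem?_getD, hj']

theorem pvGet2_set2_ne (g : List (List Int)) (i i' j j' : Nat) (v : Int)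
    (h : ¬(i' = i ∧ j' = j)) :
    pvGet2 (pvSet2 g i j v) i' j' = pvGet2 g i' j' := by
  unfold pvGet2
  rw [pvSet2_getD_row]
  split_ifs with hcase
  · have hj' : j' ≠ j := fun hjj => h ⟨hcase.1, hjj⟩
    rw [hcase.1]
    simp [List.getD_eq_getElem?_getD, (Ne.symm hj')]
  · rfl

theorem pvInv_swap {rows cols : Nat} {g : List (List Int)} {x y p q : Nat}
    (h : pvInv rows cols g x y) (hp : p < rows) (hq : q < cols) (hne : ¬(p = x ∧ q = y)) :
    pvInv rows cols (pvSwap g x y p q) p q := by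
  obtain ⟨hlen, hrow, hx, hy, h0, huniq⟩ := h
  have hvpq : pvGet2 g p q ≠ 0 := by
    intro hz
    exact hne (huniq p q hp hq hz)
  have hx' : x < g.length := by omega
  have hp1 : p < (pvSet2 g x y (pvGet2 g p q)).length := by rw [pvSet2_length]; omega
  have hq1 : q < ((pvSet2 g x y (pvGet2 g p q)).getD p []).length := by
    rw [pvSet2_rowlen, hrow p hp]; omega
  refine ⟨by rw [pvSwap, pvSet2_length, pvSet2_length]; exact hlen, ?_, hp, hq, ?_, ?_⟩
  · intro i hi
    rw [pvSwap, pvSet2_rowlen, pvSet2_rowlen]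
    exact hrow i hi
  · rw [pvSwap, pvGet2_set2_self _ _ _ _ hp1 hq1]
    exact h0
  · intro i j hi hj hz
    by_cases hpq : i = p ∧ j = q
    · exact hpq
    · rw [pvSwap, pvGet2_set2_ne _ _ _ _ _ _ hpq] at hz
      by_cases hxy : i = x ∧ j = y
      · exfalso
        rw [hxy.1, hxy.2,
          pvGet2_set2_self _ _ _ _ hx' (by rw [hrow x hx]; omega)] at hz
        exact hvpq hz
      · rw [pvGet2_set2_ne _ _ _ _ _ _ hxy] at hz
        exact absurd (huniq i j hi hj hz) hxy

theorem pvStep_eq {rows cols : Nat} {g : List (List Int)} {x y : Nat}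
    (h : pvInv rows cols g x y) (acc : Option (Nat × Nat)) (a : String) :
    ∃ (g' : List (List Int)) (x' y' : Nat), pvStepA (g, acc) a = (g', some (x, y)) ∧
      pvStepB rows cols (g, (x : Int), (y : Int)) a = (g', (x' : Int), (y' : Int)) ∧
      pvInv rows cols g' x' y' := by
  obtain ⟨hlen, hrow, hx, hy, h0, huniq⟩ := h
  have hxg : x < g.length := by omega
  have hrowx : (g.getD x []).length = cols := hrow x hx
  have hscan : pvScanA g 0 acc = some (x, y) := by
    have := pvScanA_eq g 0 acc x y hxg (by rw [hrowx]; omega) h0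
      (fun i j hi hj hz => huniq i j (by omega) (by rw [hrow i (by omega)] at hj; omega) hz)
    simpa using this
  have hhead : (g.headD []).length = cols := by
    have h0g : g.getD 0 [] = g.headD [] := by cases g <;> simp
    rw [← h0g]; exact hrow 0 (by omega)
  have hA : pvStepA (g, acc) a =
      ((if a = "DERECHA" ∧ y + 1 < cols then pvSwap g x y x (y + 1)
        else if a = "IZQUIERDA" ∧ 0 < y then pvSwap g x y x (y - 1)
        else if a = "ARRIBA" ∧ 0 < x then pvSwap g x y (x - 1) y
        else if a = "ABAJO" ∧ x + 1 < g.length then pvSwap g x y (x + 1) y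
        else g), some (x, y)) := by
    simp only [pvStepA, hscan, hhead]
  by_cases hD : a = "DERECHA"
  · subst hD
    rw [hA]
    have hdel : pvDeltaB "DERECHA" = some (0, 1) := by decide
    by_cases hg : y + 1 < cols
    · refine ⟨pvSwap g x y (x) (y + 1), x, y + 1, by simp [hg], ?_, ?_⟩
      · simp only [pvStepB, hdel]
        rw [if_pos (show (0:Int) ≤ ↑x + 0 ∧ ↑x + 0 < (rows:Int) ∧ (0:Int) ≤ ↑y + 1 ∧ ↑y + 1 < (cols:Int) by omega)]
        have e1 : ((x:Int) + 0).toNat = x := by omega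
        have e2 : ((y:Int) + 1).toNat = y + 1 := by omega
        have e3 : ((x:Int)).toNat = x := by omega
        have e4 : ((y:Int)).toNat = y := by omega
        have ex : (x:Int) + 0 = ((x : Nat) : Int) := by omega
        have ey : (y:Int) + 1 = ((y + 1 : Nat) : Int) := by omega
        rw [e1, e2, e3, e4, ex, ey]
      · exact pvInv_swap ⟨hlen, hrow, hx, hy, h0, huniq⟩ hx (by omega) (by omega)
    · refine ⟨g, x, y, by simp [hg], ?_, ⟨hlen, hrow, hx, hy, h0, huniq⟩⟩
      simp only [pvStepB, hdel]
      rw [if_neg (show ¬((0:Int) ≤ ↑x + 0 ∧ ↑x + 0 < (rows:Int) ∧ (0:Int) ≤ ↑y + 1 ∧ ↑y + 1 < (cols:Int)) by omega)]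
  by_cases hI : a = "IZQUIERDA"
  · subst hI
    rw [hA]
    have hdel : pvDeltaB "IZQUIERDA" = some (0, -1) := by decide
    by_cases hg : 0 < y
    · refine ⟨pvSwap g x y (x) (y - 1), x, y - 1, by simp [hg, hD], ?_, ?_⟩
      · simp only [pvStepB, hdel]
        rw [if_pos (show (0:Int) ≤ ↑x + 0 ∧ ↑x + 0 < (rows:Int) ∧ (0:Int) ≤ ↑y + -1 ∧ ↑y + -1 < (cols:Int) by omega)]
        have e1 : ((x:Int) + 0).toNat = x := by omega
        have e2 : ((y:Int) + -1).toNat = y - 1 := by omega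
        have e3 : ((x:Int)).toNat = x := by omega
        have e4 : ((y:Int)).toNat = y := by omega
        have ex : (x:Int) + 0 = ((x : Nat) : Int) := by omega
        have ey : (y:Int) + -1 = ((y - 1 : Nat) : Int) := by omega
        rw [e1, e2, e3, e4, ex, ey]
      · exact pvInv_swap ⟨hlen, hrow, hx, hy, h0, huniq⟩ hx (by omega) (by omega)
    · refine ⟨g, x, y, by simp [hg, hD], ?_, ⟨hlen, hrow, hx, hy, h0, huniq⟩⟩
      simp only [pvStepB, hdel]
      rw [if_neg (show ¬((0:Int) ≤ ↑x + 0 ∧ ↑x + 0 < (rows:Int) ∧ (0:Int) ≤ ↑y + -1 ∧ ↑y + -1 < (cols:Int)) by omega)]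
  by_cases hU : a = "ARRIBA"
  · subst hU
    rw [hA]
    have hdel : pvDeltaB "ARRIBA" = some (-1, 0) := by decide
    by_cases hg : 0 < x
    · refine ⟨pvSwap g x y (x - 1) (y), x - 1, y, by simp [hg, hD, hI], ?_, ?_⟩
      · simp only [pvStepB, hdel]
        rw [if_pos (show (0:Int) ≤ ↑x + -1 ∧ ↑x + -1 < (rows:Int) ∧ (0:Int) ≤ ↑y + 0 ∧ ↑y + 0 < (cols:Int) by omega)]
        have e1 : ((x:Int) + -1).toNat = x - 1 := by omega
        have e2 : ((y:Int) + 0).toNat = y := by omega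
        have e3 : ((x:Int)).toNat = x := by omega
        have e4 : ((y:Int)).toNat = y := by omega
        have ex : (x:Int) + -1 = ((x - 1 : Nat) : Int) := by omega
        have ey : (y:Int) + 0 = ((y : Nat) : Int) := by omega
        rw [e1, e2, e3, e4, ex, ey]
      · exact pvInv_swap ⟨hlen, hrow, hx, hy, h0, huniq⟩ (by omega) hy (by omega)
    · refine ⟨g, x, y, by simp [hg, hD, hI], ?_, ⟨hlen, hrow, hx, hy, h0, huniq⟩⟩
      simp only [pvStepB, hdel]
      rw [if_neg (show ¬((0:Int) ≤ ↑x + -1 ∧ ↑x + -1 < (rows:Int) ∧ (0:Int) ≤ ↑y + 0 ∧ ↑y + 0 < (cols:Int)) by omega)]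
  by_cases hB : a = "ABAJO"
  · subst hB
    rw [hA]
    have hdel : pvDeltaB "ABAJO" = some (1, 0) := by decide
    by_cases hg : x + 1 < rows
    · refine ⟨pvSwap g x y (x + 1) (y), x + 1, y, by simp [hg, hD, hI, hU, hlen], ?_, ?_⟩
      · simp only [pvStepB, hdel]
        rw [if_pos (show (0:Int) ≤ ↑x + 1 ∧ ↑x + 1 < (rows:Int) ∧ (0:Int) ≤ ↑y + 0 ∧ ↑y + 0 < (cols:Int) by omega)]
        have e1 : ((x:Int) + 1).toNat = x + 1 := by omega
        have e2 : ((y:Int) + 0).toNat = y := by omega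
        have e3 : ((x:Int)).toNat = x := by omega
        have e4 : ((y:Int)).toNat = y := by omega
        have ex : (x:Int) + 1 = ((x + 1 : Nat) : Int) := by omega
        have ey : (y:Int) + 0 = ((y : Nat) : Int) := by omega
        rw [e1, e2, e3, e4, ex, ey]
      · exact pvInv_swap ⟨hlen, hrow, hx, hy, h0, huniq⟩ (by omega) hy (by omega)
    · refine ⟨g, x, y, by simp [hg, hD, hI, hU, hlen], ?_, ⟨hlen, hrow, hx, hy, h0, huniq⟩⟩
      simp only [pvStepB, hdel]
      rw [if_neg (show ¬((0:Int) ≤ ↑x + 1 ∧ ↑x + 1 < (rows:Int) ∧ (0:Int) ≤ ↑y + 0 ∧ ↑y + 0 < (cols:Int)) by omega)]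
  · refine ⟨g, x, y, ?_, ?_, ⟨hlen, hrow, hx, hy, h0, huniq⟩⟩
    · rw [hA]
      simp [hD, hI, hU, hB]
    · have hdel : pvDeltaB a = none := by simp [pvDeltaB, hD, hI, hU, hB]
      simp [pvStepB, hdel]

theorem pvFold_eq {rows cols : Nat} : ∀ (acts : List String) (g : List (List Int))
    (acc : Option (Nat × Nat)) (x y : Nat), pvInv rows cols g x y →
    (acts.foldl pvStepA (g, acc)).1 = (acts.foldl (pvStepB rows cols) (g, (x : Int), (y : Int))).1 := by
  intro acts
  induction acts with
  | nil => intro g acc x y _; rfl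
  | cons a rest ih =>
    intro g acc x y h
    obtain ⟨g', x', y', hA, hB, hinv⟩ := pvStep_eq h acc a
    simp only [List.foldl_cons, hA, hB]
    exact ih g' (some (x, y)) x' y' hinv

theorem pvStepA_noop {g : List (List Int)} {acc : Option (Nat × Nat)} {a : String}
    (h4 : ¬a = "DERECHA" ∧ ¬a = "IZQUIERDA" ∧ ¬a = "ARRIBA" ∧ ¬a = "ABAJO") :
    ∃ acc', pvStepA (g, acc) a = (g, acc') := by
  obtain ⟨h1, h2, h3, h4'⟩ := h4
  cases hscan : pvScanA g 0 acc with
  | none => exact ⟨none, by simp [pvStepA, hscan]⟩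
  | some p =>
    cases p with
    | mk u v => exact ⟨some (u, v), by simp [pvStepA, hscan, h1, h2, h3, h4']⟩

theorem pvFoldA_noop : ∀ (acts : List String) (g : List (List Int)) (acc : Option (Nat × Nat)),
    (∀ a ∈ acts, ¬a = "DERECHA" ∧ ¬a = "IZQUIERDA" ∧ ¬a = "ARRIBA" ∧ ¬a = "ABAJO") →
    (acts.foldl pvStepA (g, acc)).1 = g := by
  intro acts
  induction acts with
  | nil => intro g acc _; rfl
  | cons a rest ih =>
    intro g acc h
    obtain ⟨acc', heq⟩ := pvStepA_noop (h a (by simp))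
    rw [List.foldl_cons, heq]
    exact ih g acc' (fun b hb => h b (by simp [hb]))

theorem pvFoldB_noop (rows cols : Nat) : ∀ (acts : List String) (st : List (List Int) × Int × Int),
    (∀ a ∈ acts, ¬a = "DERECHA" ∧ ¬a = "IZQUIERDA" ∧ ¬a = "ARRIBA" ∧ ¬a = "ABAJO") →
    acts.foldl (pvStepB rows cols) st = st := by
  intro acts
  induction acts with
  | nil => intro st _; rfl
  | cons a rest ih =>
    intro st h
    obtain ⟨h1, h2, h3, h4⟩ := h a (by simp)
    have hdel : pvDeltaB a = none := by simp [pvDeltaB, h1, h2, h3, h4]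
    have hst : pvStepB rows cols st a = st := by simp [pvStepB, hdel]
    simp only [List.foldl_cons, hst]
    exact ih st (fun b hb => h b (by simp [hb]))

-- ===== VERDICT (by name: the statement is the Claim_ definition above) =====
theorem CREAR_MATRIZ_TEMPORAL_spec : Claim_equal_CREAR_MATRIZ_TEMPORAL := by
  intro ACCIONES M _ hPre
  show CREAR_MATRIZ_TEMPORAL ACCIONES M = CREAR_MATRIZ_TEMPORAL_alt ACCIONES M
  unfold CREAR_MATRIZ_TEMPORAL CREAR_MATRIZ_TEMPORAL_alt
  simp only [List.map_id']
  rcases hPre with hnomove | ⟨hrect, x, hx, y, hy, h0, huniq⟩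
  · rw [pvFoldA_noop ACCIONES M none hnomove]
    cases pvFindZeroB M 0 with
    | none => rfl
    | some p =>
      cases p with
      | mk a b =>
        show M = (List.foldl (pvStepB M.length (M.headD []).length) (M, (a : Int), (b : Int)) ACCIONES).1
        rw [pvFoldB_noop M.length (M.headD []).length ACCIONES _ hnomove]
  · have hrow : ∀ i < M.length, (M.getD i []).length = (M.headD []).length := by
      intro i hi
      have hmem : M.getD i [] ∈ M := by
        rw [List.getD_eq_getElem?_getD, List.getElem?_eq_getElem hi]
        exact List.getElem_mem hi
      exact hrect _ hmem
    have hInv : pvInv M.length (M.headD []).length M x y :=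
      ⟨rfl, hrow, hx, hy, h0, fun i j hi hj hz => huniq i hi j hj hz⟩
    have hfind : pvFindZeroB M 0 = some (x, y) := by
      have := pvFindZeroB_eq M 0 x y hx (by rw [hrow x hx]; omega) h0
        (fun i j hi hj hz => huniq i (by omega) j (by rw [hrow i (by omega)] at hj; omega) hz)
      simpa using this
    simp only [hfind]
    exact pvFold_eq ACCIONES M none x y hInv
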